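-- pv_equiv track=rewrite | github.com/iKaueMatos/nova-tag-zpl | src/service/label_generator_service.py | generate_zpl_and_sku_ean
-- ===== SOURCE A (Python) =====
-- from typing import List, Tuple
--
-- def generate_zpl_and_sku_ean(eans_and_skus: List[Tuple[str, str, int]]) -> str:
--     zpl = []
--
--     for ean, sku, quantity in eans_and_skus:
--         for _ in range(quantity):
--             if ean:
--                 zpl.append(f"^FO80,35^BY3,80,Y^BEN,100,Y^FD{ean}^FS")
--                 zpl.append(f"^FO475,35^BY3,80,Y^BEN,100,Y^FD{ean}^FS")
--             if sku:
--                 zpl.append(f"^FO440,168^A0N,20,20^FDSKU: {sku}^FS")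
--             zpl.append("^XZ")
--
--     return "\n".join(zpl)
-- ===== SOURCE B (Python) =====
-- def generate_zpl_and_sku_ean(eans_and_skus):
--     out = ""
--     for ean, sku, quantity in eans_and_skus:
--         block = ""
--         if ean:
--             block += f"^FO80,35^BY3,80,Y^BEN,100,Y^FD{ean}^FS\n"
--             block += f"^FO475,35^BY3,80,Y^BEN,100,Y^FD{ean}^FS\n"
--         if sku:
--             block += f"^FO440,168^A0N,20,20^FDSKU: {sku}^FS\n"
--         block += "^XZ\n"
--         out += block * quantity
--     return out[:-1]
-- ===== Notes on version B (the rewrite author's own statement) =====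
-- stated objective: alternative
-- what changed: B never builds a list of lines: it accumulates one output string directly, building each tuple's newline-terminated block once, repeating it with Python string multiplication (block * quantity), and trimming the final newline with out[:-1] instead of '\n'.join.
import Mathlib
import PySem

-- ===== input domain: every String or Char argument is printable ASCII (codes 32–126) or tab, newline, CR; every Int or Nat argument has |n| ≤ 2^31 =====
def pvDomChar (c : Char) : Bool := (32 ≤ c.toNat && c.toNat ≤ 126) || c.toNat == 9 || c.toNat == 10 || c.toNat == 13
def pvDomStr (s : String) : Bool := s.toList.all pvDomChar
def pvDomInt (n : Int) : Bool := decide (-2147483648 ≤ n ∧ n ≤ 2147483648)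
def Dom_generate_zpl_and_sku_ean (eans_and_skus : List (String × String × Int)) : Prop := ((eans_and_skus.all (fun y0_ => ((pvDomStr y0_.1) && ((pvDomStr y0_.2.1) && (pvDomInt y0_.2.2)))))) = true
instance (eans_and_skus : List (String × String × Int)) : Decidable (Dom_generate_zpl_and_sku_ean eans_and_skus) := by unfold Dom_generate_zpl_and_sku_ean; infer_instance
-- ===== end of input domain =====

-- B drops the list-of-lines + join entirely: it accumulates ONE string of newline-terminated
-- lines (branch decisions once per tuple, repetition by string multiplication) and trims the
-- final newline with out[:-1] (objective: alternative decomposition, same cost).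

def pvLine1 (ean : String) : String := "^FO80,35^BY3,80,Y^BEN,100,Y^FD" ++ ean ++ "^FS"
def pvLine2 (ean : String) : String := "^FO475,35^BY3,80,Y^BEN,100,Y^FD" ++ ean ++ "^FS"
def pvLineSku (sku : String) : String := "^FO440,168^A0N,20,20^FDSKU: " ++ sku ++ "^FS"

-- ===== PORT A =====
def generate_zpl_and_sku_ean (eans_and_skus : List (String × String × Int)) : String :=
  let zpl := eans_and_skus.foldl (fun zpl t =>
    (PySem.List.pyRange 0 t.2.2 1).foldl (fun zpl _ =>
      let zpl := if t.1 ≠ "" then zpl ++ [pvLine1 t.1, pvLine2 t.1] else zpl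
      let zpl := if t.2.1 ≠ "" then zpl ++ [pvLineSku t.2.1] else zpl
      zpl ++ ["^XZ"]) zpl) []
  PySem.Str.join "\n" zpl

-- ===== PORT B =====
-- Python's `s * q` on strings: q copies concatenated, q ≤ 0 giving "" (exact)
def pvStrMul (s : String) (q : Int) : String := (List.replicate q.toNat s).foldl (· ++ ·) ""

def generate_zpl_and_sku_ean_alt (eans_and_skus : List (String × String × Int)) : String :=
  let out := eans_and_skus.foldl (fun out t =>
    let block := ""
    let block := if t.1 ≠ "" then block ++ pvLine1 t.1 ++ "\n" ++ pvLine2 t.1 ++ "\n" else block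
    let block := if t.2.1 ≠ "" then block ++ pvLineSku t.2.1 ++ "\n" else block
    let block := block ++ "^XZ\n"
    out ++ pvStrMul block t.2.2) ""
  PySem.Str.slice out none (some (-1))   -- out[:-1]

-- ===== PRECONDITION & SPEC =====
def Spec_generate_zpl_and_sku_ean (eans_and_skus : List (String × String × Int)) (out : String) : Prop := out = generate_zpl_and_sku_ean_alt eans_and_skus
instance (eans_and_skus : List (String × String × Int)) (out : String) : Decidable (Spec_generate_zpl_and_sku_ean eans_and_skus out) := by unfold Spec_generate_zpl_and_sku_ean; infer_instance

-- ===== CLAIM (what is proved, stated in full; the proofs are below) =====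
def Claim_equal_generate_zpl_and_sku_ean : Prop := ∀ (eans_and_skus : List (String × String × Int)), Dom_generate_zpl_and_sku_ean eans_and_skus → Spec_generate_zpl_and_sku_ean eans_and_skus (generate_zpl_and_sku_ean eans_and_skus)

-- ===== LEMMAS AND PROOFS =====

-- the lines one unit of (ean, sku) contributes, as A lists them
def pvBlock (ean sku : String) : List String :=
  (if ean ≠ "" then [pvLine1 ean, pvLine2 ean] else []) ++
  (if sku ≠ "" then [pvLineSku sku] else []) ++ ["^XZ"]

-- all lines A accumulates, as one flatMap
def pvLines (eans_and_skus : List (String × String × Int)) : List String :=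
  eans_and_skus.flatMap (fun t => (List.replicate t.2.2.toNat (pvBlock t.1 t.2.1)).flatten)

theorem foldl_const_append {α : Type} (b : List String) :
    ∀ (l : List α) (acc : List String),
      l.foldl (fun z _ => z ++ b) acc = acc ++ (List.replicate l.length b).flatten := by
  intro l
  induction l with
  | nil => intro acc; simp
  | cons x xs ih => intro acc; simp [List.foldl_cons, ih, List.replicate_succ, List.append_assoc]

theorem step_eq_block (e s : String) (z : List String) :
    (let z1 := if e ≠ "" then z ++ [pvLine1 e, pvLine2 e] else z
     let z2 := if s ≠ "" then z1 ++ [pvLineSku s] else z1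
     z2 ++ ["^XZ"]) = z ++ pvBlock e s := by
  simp only [pvBlock]
  split_ifs <;> simp [List.append_assoc]

-- A's accumulated list is pvLines
theorem a_list_eq (eans_and_skus : List (String × String × Int)) :
    eans_and_skus.foldl (fun zpl t =>
      (PySem.List.pyRange 0 t.2.2 1).foldl (fun zpl _ =>
        let zpl := if t.1 ≠ "" then zpl ++ [pvLine1 t.1, pvLine2 t.1] else zpl
        let zpl := if t.2.1 ≠ "" then zpl ++ [pvLineSku t.2.1] else zpl
        zpl ++ ["^XZ"]) zpl) [] = pvLines eans_and_skus := by
  have h : ∀ acc, eans_and_skus.foldl (fun zpl t =>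
      (PySem.List.pyRange 0 t.2.2 1).foldl (fun zpl _ =>
        let zpl := if t.1 ≠ "" then zpl ++ [pvLine1 t.1, pvLine2 t.1] else zpl
        let zpl := if t.2.1 ≠ "" then zpl ++ [pvLineSku t.2.1] else zpl
        zpl ++ ["^XZ"]) zpl) acc =
      acc ++ pvLines eans_and_skus := by
    induction eans_and_skus with
    | nil => intro acc; simp [pvLines]
    | cons t ts ih =>
      intro acc
      simp only [List.foldl_cons]
      rw [ih]
      have hbody : (fun (zpl : List String) (_ : Int) =>
          let zpl := if t.1 ≠ "" then zpl ++ [pvLine1 t.1, pvLine2 t.1] else zpl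
          let zpl := if t.2.1 ≠ "" then zpl ++ [pvLineSku t.2.1] else zpl
          zpl ++ ["^XZ"]) = fun zpl _ => zpl ++ pvBlock t.1 t.2.1 := by
        funext z i; exact step_eq_block t.1 t.2.1 z
      rw [hbody, foldl_const_append (pvBlock t.1 t.2.1) _ acc,
          PySem.List.length_pyRange_one]
      simp [pvLines, List.append_assoc]
  simpa using h []

-- a string repeat distributes over toList as replicate+flatten
theorem foldl_strAppend (l : List String) :
    ∀ a : String, (l.foldl (· ++ ·) a).toList = a.toList ++ (l.map String.toList).flatten := by
  induction l with
  | nil => intro a; simp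
  | cons x xs ih => intro a; simp [List.foldl_cons, ih, String.toList_append]

theorem toList_pvStrMul (s : String) (q : Int) :
    (pvStrMul s q).toList = (List.replicate q.toNat s.toList).flatten := by
  unfold pvStrMul
  rw [foldl_strAppend, List.map_replicate]
  simp

-- flatMap distributes into a replicated flatten
theorem flatten_replicate_flatMap {α β : Type} (n : Nat) (B : List α) (f : α → List β) :
    ((List.replicate n B).flatten).flatMap f = (List.replicate n (B.flatMap f)).flatten := by
  induction n with
  | zero => simp
  | succ k ih => simp [List.replicate_succ, ih]

-- B's accumulated string, at the char level, is pvLines with newline terminators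
theorem b_out_toList (eans_and_skus : List (String × String × Int)) :
    (eans_and_skus.foldl (fun out t =>
      let block := ""
      let block := if t.1 ≠ "" then block ++ pvLine1 t.1 ++ "\n" ++ pvLine2 t.1 ++ "\n" else block
      let block := if t.2.1 ≠ "" then block ++ pvLineSku t.2.1 ++ "\n" else block
      let block := block ++ "^XZ\n"
      out ++ pvStrMul block t.2.2) "").toList
    = (pvLines eans_and_skus).flatMap (fun l => l.toList ++ ['\n']) := by
  have h : ∀ acc : String, (eans_and_skus.foldl (fun out t =>
      let block := ""
      let block := if t.1 ≠ "" then block ++ pvLine1 t.1 ++ "\n" ++ pvLine2 t.1 ++ "\n" else block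
      let block := if t.2.1 ≠ "" then block ++ pvLineSku t.2.1 ++ "\n" else block
      let block := block ++ "^XZ\n"
      out ++ pvStrMul block t.2.2) acc).toList
      = acc.toList ++ (pvLines eans_and_skus).flatMap (fun l => l.toList ++ ['\n']) := by
    induction eans_and_skus with
    | nil => intro acc; simp [pvLines]
    | cons t ts ih =>
      intro acc
      simp only [List.foldl_cons]
      rw [ih]
      simp only [String.toList_append, toList_pvStrMul]
      have hb : ((if t.2.1 ≠ "" then
            (if t.1 ≠ "" then ("" : String) ++ pvLine1 t.1 ++ "\n" ++ pvLine2 t.1 ++ "\n" else "") ++ pvLineSku t.2.1 ++ "\n"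
          else if t.1 ≠ "" then ("" : String) ++ pvLine1 t.1 ++ "\n" ++ pvLine2 t.1 ++ "\n" else "").toList ++ "^XZ\n".toList)
          = (pvBlock t.1 t.2.1).flatMap (fun l => l.toList ++ ['\n']) := by
        simp only [pvBlock]
        split_ifs <;> simp [String.toList_append, List.append_assoc]
      rw [hb]
      simp [pvLines, List.flatMap_cons, List.flatMap_append, flatten_replicate_flatMap,
            List.append_assoc]
  rw [h]; simp

-- joining with '\n' = terminating every line with '\n' then dropping the last char
theorem join_eq_flat_dropLast :
    ∀ (L : List (List Char)),
      PySem.Chars.join ['\n'] L = (L.flatMap (fun l => l ++ ['\n'])).dropLast := by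
  intro L
  induction L with
  | nil => simp [PySem.Chars.join_nil]
  | cons x xs ih =>
    cases xs with
    | nil => simp [PySem.Chars.join_singleton]
    | cons y ys =>
      rw [PySem.Chars.join_cons_cons, ih]
      have hne : ((y :: ys).flatMap (fun l => l ++ ['\n'])) ≠ [] := by
        simp [List.flatMap_cons]
      rw [show List.flatMap (fun l => l ++ ['\n']) (x :: y :: ys)
            = x ++ ['\n'] ++ List.flatMap (fun l => l ++ ['\n']) (y :: ys) from by
          simp [List.flatMap_cons, List.append_assoc]]
      rw [List.dropLast_append_of_ne_nil hne]

-- ===== VERDICT (by name: the statement is the Claim_ definition above) =====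
theorem generate_zpl_and_sku_ean_spec : Claim_equal_generate_zpl_and_sku_ean := by
  intro xs _
  show generate_zpl_and_sku_ean xs = generate_zpl_and_sku_ean_alt xs
  rw [← String.toList_inj]
  simp only [generate_zpl_and_sku_ean, generate_zpl_and_sku_ean_alt]
  rw [a_list_eq]
  rw [PySem.Str.toList_join]
  rw [show ("\n" : String).toList = ['\n'] from rfl]
  rw [join_eq_flat_dropLast]
  rw [show ∀ s : String, (PySem.Str.slice s none (some (-1))).toList = s.toList.dropLast
        from fun s => PySem.Str.slice_to_neg_one s]
  rw [b_out_toList]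
  congr 1
  simp [List.flatMap_map]
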